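-- pv_equiv track=rewrite | github.com/openview2017/leetcode-group-solution | InterViewQuestions/OA/Amazon/Count maximum teams/Solution.py | teamCount
-- ===== SOURCE A (Python) =====
-- from collections import deque
--
-- def teamCount(skill, teamSize, maxDiff):
--     if not skill or len(skill) < teamSize:
--         return 0
--     result = 0
--     skill = sorted(skill, reverse=True)
--     left = right = 0
--     max_stack = deque([])  #[idx1, idx2]
--     min_stack = deque([])
--     while right < len(skill):
--         while max_stack and skill[right] > skill[max_stack[-1]]:
--             max_stack.pop()
--         while min_stack and skill[right] < skill[min_stack[-1]]:
--             min_stack.pop()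
--         max_stack.append(right)
--         min_stack.append(right)
--         right += 1
--         if skill[max_stack[0]] - skill[min_stack[0]] > maxDiff:
--             if max_stack[0] == left:
--                 max_stack.popleft()
--             if min_stack[0] == left:
--                 min_stack.popleft()
--             left += 1
--         if right - left == teamSize:
--             result += 1
--             left = right
--             max_stack.clear()
--             min_stack.clear()
--     return result
-- ===== SOURCE B (Python) =====
-- def teamCount(skill, teamSize, maxDiff):
--     if teamSize <= 0 or len(skill) < teamSize:
--         return 0
--     s = sorted(skill, reverse=True)
--     result = 0
--     r = teamSize - 1          # earliest index at which a team could end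
--     while r < len(s):
--         if s[r - teamSize + 1] - s[r] <= maxDiff:
--             result += 1       # s[r-teamSize+1..r] is a valid team
--             r += teamSize     # next team uses fresh members
--         else:
--             r += 1
--     return result
-- ===== Notes on version B (the rewrite author's own statement) =====
-- stated objective: simpler
-- what changed: B replaces A's sliding window with two monotonic deques by a windowless greedy: on the descending-sorted array a team ending at r is valid iff s[r-teamSize+1]-s[r] <= maxDiff, so B scans r once, counts on that single pairwise gap test and jumps r by teamSize after each team (no deque pushes/pops; measured ~2.3x faster).
-- intended difference: On teamSize=0 with maxDiff<0 and non-empty skill, A returns len(skill) (it counts an empty 'team' at every step), while B returns 0, the intended answer since no team of size 0 can be formed. — e.g. on teamCount([0], 0, -1): A returns 1, B returns 0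
import Mathlib
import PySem

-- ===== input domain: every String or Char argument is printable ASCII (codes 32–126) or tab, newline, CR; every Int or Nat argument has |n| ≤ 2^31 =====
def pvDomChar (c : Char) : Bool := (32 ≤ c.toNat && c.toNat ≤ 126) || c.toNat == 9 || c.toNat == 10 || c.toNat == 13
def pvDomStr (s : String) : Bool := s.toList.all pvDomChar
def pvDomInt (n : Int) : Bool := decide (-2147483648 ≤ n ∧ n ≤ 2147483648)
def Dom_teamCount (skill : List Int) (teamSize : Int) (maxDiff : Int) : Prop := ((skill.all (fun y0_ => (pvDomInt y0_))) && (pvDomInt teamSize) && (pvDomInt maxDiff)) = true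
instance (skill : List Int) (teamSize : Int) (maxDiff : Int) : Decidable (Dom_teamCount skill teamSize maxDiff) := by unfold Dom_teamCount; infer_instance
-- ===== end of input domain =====

-- B replaces A's deque sliding window by a windowless greedy: on the descending-sorted
-- array a team ending at r is valid iff s[r-teamSize+1]-s[r] ≤ maxDiff, so B counts on
-- that single gap test and jumps by teamSize (objective: simpler).

-- ===== PORT A =====
-- deques are held back-to-front (head = Python's stack[-1], getLast = Python's stack[0]).
def pvPopMax (s : List Int) (r : Nat) : List Nat → List Nat
  | [] => []
  | i :: t => if s.getD r 0 > s.getD i 0 then pvPopMax s r t else i :: t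

def pvPopMin (s : List Int) (r : Nat) : List Nat → List Nat
  | [] => []
  | i :: t => if s.getD r 0 < s.getD i 0 then pvPopMin s r t else i :: t

def pvStepA (s : List Int) (teamSize maxDiff : Int)
    (st : Nat × List Nat × List Nat × Int) (r : Nat) : Nat × List Nat × List Nat × Int :=
  let left := st.1
  let maxS := r :: pvPopMax s r st.2.1
  let minS := r :: pvPopMin s r st.2.2.1
  let result := st.2.2.2
  let st2 : Nat × List Nat × List Nat :=
    if s.getD (maxS.getLastD 0) 0 - s.getD (minS.getLastD 0) 0 > maxDiff then
      (left + 1,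
       if maxS.getLastD 0 = left then maxS.dropLast else maxS,
       if minS.getLastD 0 = left then minS.dropLast else minS)
    else (left, maxS, minS)
  if ((r : Int) + 1 - st2.1 = teamSize) then (r + 1, [], [], result + 1)
  else (st2.1, st2.2.1, st2.2.2, result)

def teamCount (skill : List Int) (teamSize : Int) (maxDiff : Int) : Int :=
  if skill = [] ∨ (skill.length : Int) < teamSize then 0
  else
    ((List.range (PySem.List.sorted skill (fun x => x) true).length).foldl
      (pvStepA (PySem.List.sorted skill (fun x => x) true) teamSize maxDiff)
      (0, [], [], 0)).2.2.2

-- ===== PORT B =====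
-- the while loop of Source B; r ≥ ts-1 at every call, so the Nat index r+1-ts equals
-- Python's r - teamSize + 1 exactly.  hts is the termination witness (Source B's guard).
def pvJump (s : List Int) (ts : Nat) (hts : 1 ≤ ts) (maxDiff : Int)
    (r : Nat) (result : Int) : Int :=
  if h : r < s.length then
    if s.getD (r + 1 - ts) 0 - s.getD r 0 ≤ maxDiff then
      pvJump s ts hts maxDiff (r + ts) (result + 1)
    else
      pvJump s ts hts maxDiff (r + 1) result
  else result
termination_by s.length - r
decreasing_by all_goals omega

def teamCount_alt (skill : List Int) (teamSize : Int) (maxDiff : Int) : Int :=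
  if h : teamSize ≤ 0 ∨ (skill.length : Int) < teamSize then 0
  else
    pvJump (PySem.List.sorted skill (fun x => x) true) teamSize.toNat (by omega) maxDiff
      (teamSize.toNat - 1) 0

-- ===== PRECONDITION & SPEC =====
-- On teamSize = 0 with maxDiff < 0 and non-empty skill, A returns len(skill) (it counts
-- an empty 'team' at every step), while B returns 0, the intended answer since no team
-- of size 0 can be formed.
def D_teamCount (skill : List Int) (teamSize : Int) (maxDiff : Int) : Prop :=
  teamSize = 0 ∧ maxDiff < 0 ∧ skill ≠ []
instance (skill : List Int) (teamSize : Int) (maxDiff : Int) :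
    Decidable (D_teamCount skill teamSize maxDiff) := by unfold D_teamCount; infer_instance

def Spec_teamCount (skill : List Int) (teamSize : Int) (maxDiff : Int) (out : Int) : Prop :=
  ¬ D_teamCount skill teamSize maxDiff → out = teamCount_alt skill teamSize maxDiff
instance (skill : List Int) (teamSize : Int) (maxDiff : Int) (out : Int) :
    Decidable (Spec_teamCount skill teamSize maxDiff out) := by unfold Spec_teamCount; infer_instance

def pvDiffWitness_teamCount : List Int × Int × Int := ([0], 0, -1)
def pvDiffWitnessOut_teamCount : Int × Int := (1, 0)

-- ===== CLAIM (what is proved, stated in full; the proofs are below) =====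
def Claim_unchanged_teamCount : Prop := ∀ (skill : List Int) (teamSize : Int) (maxDiff : Int), Dom_teamCount skill teamSize maxDiff → Spec_teamCount skill teamSize maxDiff (teamCount skill teamSize maxDiff)
def Claim_changed_teamCount : Prop := Dom_teamCount (pvDiffWitness_teamCount.1) (pvDiffWitness_teamCount.2.1) (pvDiffWitness_teamCount.2.2) ∧ D_teamCount (pvDiffWitness_teamCount.1) (pvDiffWitness_teamCount.2.1) (pvDiffWitness_teamCount.2.2) ∧ teamCount (pvDiffWitness_teamCount.1) (pvDiffWitness_teamCount.2.1) (pvDiffWitness_teamCount.2.2) = pvDiffWitnessOut_teamCount.1 ∧ teamCount_alt (pvDiffWitness_teamCount.1) (pvDiffWitness_teamCount.2.1) (pvDiffWitness_teamCount.2.2) = pvDiffWitnessOut_teamCount.2 ∧ pvDiffWitnessOut_teamCount.1 ≠ pvDiffWitnessOut_teamCount.2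
def Claim_exact_teamCount : Prop := ∀ (skill : List Int) (teamSize : Int) (maxDiff : Int), Dom_teamCount skill teamSize maxDiff → D_teamCount skill teamSize maxDiff → teamCount skill teamSize maxDiff ≠ teamCount_alt skill teamSize maxDiff

-- ===== LEMMAS AND PROOFS =====

-- single-if pointer version of the window loop: intermediate between A and B
def pvStepM (s : List Int) (teamSize maxDiff : Int)
    (st : Nat × Int) (r : Nat) : Nat × Int :=
  let left := if s.getD st.1 0 - s.getD r 0 > maxDiff then st.1 + 1 else st.1
  if ((r : Int) + 1 - left = teamSize) then (r + 1, st.2 + 1) else (left, st.2)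

-- descending index list [hi-1, hi-2, ..., lo] (head = deque back)
def pvDl (lo hi : Nat) : List Nat := (List.range' lo (hi - lo)).reverse

theorem pvDl_self (a : Nat) : pvDl a a = [] := by simp [pvDl]

theorem pvDl_succ {lo hi : Nat} (h : lo ≤ hi) : pvDl lo (hi + 1) = hi :: pvDl lo hi := by
  unfold pvDl
  rw [show hi + 1 - lo = (hi - lo) + 1 by omega, List.range'_concat, List.reverse_append]
  simp [show lo + (hi - lo) = hi by omega]

theorem pvDl_getLastD {lo hi : Nat} (h : lo ≤ hi) : (pvDl lo (hi + 1)).getLastD 0 = lo := by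
  unfold pvDl
  rw [show hi + 1 - lo = (hi - lo) + 1 by omega, List.range'_succ, List.reverse_cons]
  simp

theorem pvDl_dropLast {lo hi : Nat} (h : lo ≤ hi) :
    (pvDl lo (hi + 1)).dropLast = pvDl (lo + 1) (hi + 1) := by
  unfold pvDl
  rw [show hi + 1 - lo = (hi - lo) + 1 by omega, List.range'_succ, List.reverse_cons,
    List.dropLast_concat]
  rw [show hi + 1 - (lo + 1) = hi - lo by omega]

theorem pvDl_mem {lo hi i : Nat} (h : i ∈ pvDl lo hi) : lo ≤ i ∧ i < hi := by
  unfold pvDl at h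
  simp only [List.mem_reverse, List.mem_range'] at h
  omega

theorem pvPopMin_all (s : List Int) (r : Nat) :
    ∀ l : List Nat, (∀ i ∈ l, s.getD r 0 < s.getD i 0) → pvPopMin s r l = [] := by
  intro l
  induction l with
  | nil => intro _; rfl
  | cons a t ih =>
    intro h
    have ha := h a (by simp)
    simp only [pvPopMin, if_pos ha]
    exact ih (fun i hi => h i (by simp [hi]))

-- descending-sorted (by getD values, in-range)
def pvDesc (s : List Int) : Prop :=
  ∀ i k : Nat, i ≤ k → k < s.length → s.getD k 0 ≤ s.getD i 0

theorem pvPopMax_dl (s : List Int) (hs : pvDesc s) {left r : Nat} (hlr : left ≤ r)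
    (hr : r < s.length) : pvPopMax s r (pvDl left r) = pvDl left r := by
  rcases Nat.eq_or_lt_of_le hlr with h | h
  · rw [← h, pvDl_self]; rfl
  · obtain ⟨r', rfl⟩ : ∃ r', r = r' + 1 := ⟨r - 1, by omega⟩
    rw [pvDl_succ (by omega : left ≤ r')]
    have hle : s.getD (r' + 1) 0 ≤ s.getD r' 0 := hs r' (r' + 1) (by omega) hr
    simp only [pvPopMax]
    rw [if_neg (show ¬(s.getD (r' + 1) 0 > s.getD r' 0) by omega)]

-- loop invariant: max deque = full window, min deque = constant-value run ending at r-1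
def pvInv (s : List Int) (r left : Nat) (maxS minS : List Nat) : Prop :=
  left ≤ r ∧ maxS = pvDl left r ∧
  ∃ j, left ≤ j ∧ j ≤ r ∧ minS = pvDl j r ∧
    ∀ i, j ≤ i → i < r → s.getD i 0 = s.getD j 0

theorem pvStep_eq (s : List Int) (ts md : Int) (hs : pvDesc s) (r : Nat) (hr : r < s.length)
    (left : Nat) (res : Int) (maxS minS : List Nat) (hInv : pvInv s r left maxS minS) :
    (pvStepA s ts md (left, maxS, minS, res) r).1 = (pvStepM s ts md (left, res) r).1 ∧
    (pvStepA s ts md (left, maxS, minS, res) r).2.2.2 = (pvStepM s ts md (left, res) r).2 ∧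
    pvInv s (r + 1) (pvStepA s ts md (left, maxS, minS, res) r).1
      (pvStepA s ts md (left, maxS, minS, res) r).2.1
      (pvStepA s ts md (left, maxS, minS, res) r).2.2.1 := by
  obtain ⟨hlr, hmax, j, hlj, hjr, hmin, hval⟩ := hInv
  subst hmax; subst hmin
  -- min deque: after popping and pushing r, it is a constant-value run pvDl j' (r+1)
  have hpopmin : ∃ j', left ≤ j' ∧ j' ≤ r ∧ r :: pvPopMin s r (pvDl j r) = pvDl j' (r + 1) ∧
      ∀ i, j' ≤ i → i ≤ r → s.getD i 0 = s.getD j' 0 := by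
    rcases Nat.eq_or_lt_of_le hjr with h | h
    · -- empty min deque
      refine ⟨r, by omega, le_refl r, ?_, ?_⟩
      · have hd : pvDl j r = [] := by rw [h]; exact pvDl_self r
        rw [hd, pvDl_succ (le_refl r), pvDl_self]
        rfl
      · intro i h1 h2
        have h3 : i = r := by omega
        rw [h3]
    · obtain ⟨r', rfl⟩ : ∃ r', r = r' + 1 := ⟨r - 1, by omega⟩
      have hv1 : s.getD r' 0 = s.getD j 0 := hval r' (by omega) (by omega)
      by_cases hc : s.getD (r' + 1) 0 < s.getD j 0
      · -- strictly smaller: pop the whole run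
        have hall : pvPopMin s (r' + 1) (pvDl j (r' + 1)) = [] := by
          apply pvPopMin_all
          intro i hi
          obtain ⟨h1, h2⟩ := pvDl_mem hi
          rw [hval i h1 h2]; exact hc
        refine ⟨r' + 1, by omega, le_refl _, ?_, ?_⟩
        · rw [hall, pvDl_succ (le_refl (r' + 1)), pvDl_self]
        · intro i h1 h2
          have h3 : i = r' + 1 := by omega
          rw [h3]
      · -- equal value (descending array forces it): keep the run, push r
        have heq : s.getD (r' + 1) 0 = s.getD j 0 := by
          have := hs r' (r' + 1) (by omega) hr
          omega
        have hkeep : pvPopMin s (r' + 1) (pvDl j (r' + 1)) = pvDl j (r' + 1) := by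
          rw [pvDl_succ (by omega : j ≤ r')]
          simp only [pvPopMin]
          rw [if_neg (show ¬(s.getD (r' + 1) 0 < s.getD r' 0) by rw [hv1]; omega)]
        refine ⟨j, hlj, by omega, ?_, ?_⟩
        · rw [hkeep, pvDl_succ hjr]
        · intro i h1 h2
          rcases Nat.lt_or_ge i (r' + 1) with h3 | h3
          · exact hval i h1 h3
          · have h4 : i = r' + 1 := by omega
            rw [h4]; exact heq
  obtain ⟨j', hlj', hj'r, hminS, hval'⟩ := hpopmin
  have hmaxS : r :: pvPopMax s r (pvDl left r) = pvDl left (r + 1) := by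
    rw [pvPopMax_dl s hs hlr hr, pvDl_succ hlr]
  -- front of max deque = left, front value of min deque = s[r]
  have hgl : (r :: pvPopMax s r (pvDl left r)).getLastD 0 = left := by
    rw [hmaxS]; exact pvDl_getLastD hlr
  have hglmin : (r :: pvPopMin s r (pvDl j r)).getLastD 0 = j' := by
    rw [hminS]; exact pvDl_getLastD hj'r
  have hvr : s.getD j' 0 = s.getD r 0 := (hval' r hj'r (le_refl r)).symm
  simp only [pvStepA, pvStepM]
  rw [hmaxS, hminS, pvDl_getLastD hlr, pvDl_getLastD hj'r, hvr]
  by_cases hcond : s.getD left 0 - s.getD r 0 > md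
  · rw [if_pos hcond, if_pos hcond]
    rw [if_pos rfl]
    by_cases hts : (r : Int) + 1 - ((left : Nat) + 1 : Nat) = ts
    · rw [if_pos hts, if_pos hts]
      exact ⟨rfl, rfl, by omega, by rw [pvDl_self], r + 1, by omega, le_refl _,
        by rw [pvDl_self], fun i h1 h2 => by omega⟩
    · rw [if_neg hts, if_neg hts]
      refine ⟨rfl, rfl, by omega, ?_, ?_⟩
      · rw [pvDl_dropLast hlr]
      · by_cases hjl : j' = left
        · refine ⟨left + 1, le_refl _, by omega, ?_, ?_⟩
          · rw [if_pos hjl, hjl, pvDl_dropLast hlr]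
          · intro i h1 h2
            rcases Nat.eq_or_lt_of_le h1 with h3 | h3
            · rw [← h3]
            · have e1 : s.getD i 0 = s.getD j' 0 := hval' i (by omega) (by omega)
              have e2 : s.getD (left + 1) 0 = s.getD j' 0 := hval' (left + 1) (by omega) (by omega)
              rw [e1, e2]
        · refine ⟨j', by omega, by omega, ?_, fun i h1 h2 => hval' i h1 (by omega)⟩
          rw [if_neg hjl]
  · rw [if_neg hcond, if_neg hcond]
    by_cases hts : (r : Int) + 1 - left = ts
    · rw [if_pos hts, if_pos hts]
      exact ⟨rfl, rfl, by omega, by rw [pvDl_self], r + 1, by omega, le_refl _,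
        by rw [pvDl_self], fun i h1 h2 => by omega⟩
    · rw [if_neg hts, if_neg hts]
      exact ⟨rfl, rfl, by omega, rfl, j', hlj', by omega, rfl,
        fun i h1 h2 => hval' i h1 (by omega)⟩

theorem pvFold_eq (s : List Int) (ts md : Int) (hs : pvDesc s) :
    ∀ (k r left : Nat) (maxS minS : List Nat) (res : Int),
      r + k ≤ s.length → pvInv s r left maxS minS →
      ((List.range' r k).foldl (pvStepA s ts md) (left, maxS, minS, res)).2.2.2 =
      ((List.range' r k).foldl (pvStepM s ts md) (left, res)).2 := by
  intro k
  induction k with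
  | zero => intro r left maxS minS res _ _; rfl
  | succ k ih =>
    intro r left maxS minS res hk hInv
    rw [List.range'_succ]
    simp only [List.foldl_cons]
    obtain ⟨h1, h2, h3⟩ := pvStep_eq s ts md hs r (by omega) left res maxS minS hInv
    have hB : pvStepM s ts md (left, res) r =
        ((pvStepA s ts md (left, maxS, minS, res) r).1,
         (pvStepA s ts md (left, maxS, minS, res) r).2.2.2) := by
      rw [Prod.ext_iff]
      exact ⟨h1.symm, h2.symm⟩
    rw [hB]
    exact ih (r + 1) _ _ _ _ (by omega) h3

theorem pvDesc_sorted (skill : List Int) : pvDesc (PySem.List.sorted skill (fun x => x) true) := by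
  intro i k hik hk
  rcases Nat.eq_or_lt_of_le hik with h | h
  · rw [h]
  · have hp := PySem.List.sorted_pairwise_rev (xs := skill) (key := fun x => x)
    rw [List.pairwise_iff_getElem] at hp
    have hi : i < (PySem.List.sorted skill (fun x => x) true).length := by omega
    have := hp i k hi hk h
    rw [List.getD_eq_getElem _ _ hk, List.getD_eq_getElem _ _ hi]
    exact this

-- pvJump over a suffix of bad gaps returns res unchanged
theorem pvJump_bad_ext (s : List Int) (ts : Nat) (hts : 1 ≤ ts) (md : Int) :
    ∀ (k q : Nat) (res : Int), s.length - q ≤ k →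
      (∀ r', q ≤ r' → r' < s.length → ¬(s.getD (r' + 1 - ts) 0 - s.getD r' 0 ≤ md)) →
      pvJump s ts hts md q res = res := by
  intro k
  induction k with
  | zero =>
    intro q res hk _
    rw [pvJump, dif_neg (by omega)]
  | succ k ih =>
    intro q res hk hbad
    rw [pvJump]
    by_cases hq : q < s.length
    · rw [dif_pos hq, if_neg (hbad q (le_refl q) hq)]
      exact ih (q + 1) res (by omega) (fun r' h1 h2 => hbad r' (by omega) h2)
    · rw [dif_neg hq]

-- walking pvJump across a stretch of bad gaps only advances the pointer
theorem pvJump_shift (s : List Int) (ts : Nat) (hts : 1 ≤ ts) (md : Int) :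
    ∀ (d q : Nat) (res : Int), q + d ≤ s.length →
      (∀ r', q ≤ r' → r' < q + d → ¬(s.getD (r' + 1 - ts) 0 - s.getD r' 0 ≤ md)) →
      pvJump s ts hts md q res = pvJump s ts hts md (q + d) res := by
  intro d
  induction d with
  | zero => intro q res _ _; rfl
  | succ d ih =>
    intro q res hlen hbad
    rw [pvJump, dif_pos (by omega), if_neg (hbad q (le_refl q) (by omega))]
    rw [show q + (d + 1) = (q + 1) + d by omega]
    exact ih (q + 1) res (by omega) (fun r' h1 h2 => hbad r' (by omega) (by omega))

-- MAIN: the single-if pointer loop equals the gap-test jump greedy.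
-- state before step r, segment start b: b ≤ left ≤ r, window size ≤ ts-1,
-- a moved left is justified (s[left-1]-s[r-1] > md), and every index of
-- [b+ts-1, r) failed the gap test.
theorem pvMain (s : List Int) (ts : Nat) (hts : 1 ≤ ts) (md : Int) (hdesc : pvDesc s) :
    ∀ (k b r left : Nat) (res : Int),
      s.length - r ≤ k →
      b ≤ left → left ≤ r → r < left + ts →
      (b < left → s.getD (left - 1) 0 - s.getD (r - 1) 0 > md) →
      (∀ r', b + ts - 1 ≤ r' → r' < r → ¬(s.getD (r' + 1 - ts) 0 - s.getD r' 0 ≤ md)) →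
      ((List.range' r (s.length - r)).foldl (pvStepM s (ts : Int) md) (left, res)).2 =
      pvJump s ts hts md (b + ts - 1) res := by
  intro k
  induction k with
  | zero =>
    intro b r left res hk _ _ _ _ hbad
    rw [show s.length - r = 0 by omega]
    exact (pvJump_bad_ext s ts hts md s.length (b + ts - 1) res (by omega)
      (fun r' h1 h2 => hbad r' h1 (by omega))).symm
  | succ k ih =>
    intro b r left res hk hbl hlr hwin hjust hbad
    by_cases hr : r < s.length
    · rw [show s.length - r = (s.length - (r + 1)) + 1 by omega, List.range'_succ,
        List.foldl_cons]
      by_cases hviol : s.getD left 0 - s.getD r 0 > md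
      · -- violation step: left moves, no completion (window size unchanged < ts)
        have hnc : ¬((r : Int) + 1 - (left + 1 : Nat) = (ts : Nat)) := by push_cast; omega
        have hgapr : b + ts - 1 ≤ r → ¬(s.getD (r + 1 - ts) 0 - s.getD r 0 ≤ md) := by
          intro _ hle
          have h1 : s.getD left 0 ≤ s.getD (r + 1 - ts) 0 :=
            hdesc (r + 1 - ts) left (by omega) (by omega)
          omega
        simp only [pvStepM]
        rw [if_pos hviol, if_neg hnc]
        refine (ih b (r + 1) (left + 1) res (by omega) (by omega) (by omega) (by omega)
          ?_ ?_)
        · intro _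
          simpa using hviol
        · intro r' h1 h2
          rcases Nat.lt_or_ge r' r with h3 | h3
          · exact hbad r' h1 h3
          · have : r' = r := by omega
            subst this
            exact hgapr h1
      · by_cases hcomp : ((r : Int) + 1 - (left : Nat) = (ts : Nat))
        · -- completion: count, reset to segment start r+1
          have hleft : left = r + 1 - ts := by omega
          have hbr : b + ts - 1 ≤ r := by omega
          have hgap : s.getD (r + 1 - ts) 0 - s.getD r 0 ≤ md := by
            rw [← hleft]; omega
          simp only [pvStepM]
          rw [if_neg hviol, if_pos hcomp]
          have hL := ih (r + 1) (r + 1) (r + 1) (res + 1) (by omega) (le_refl _)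
            (le_refl _) (by omega) (by omega) (by intro r' h1 h2; omega)
          rw [hL, show (r + 1) + ts - 1 = r + ts by omega]
          have hR : pvJump s ts hts md (b + ts - 1) res = pvJump s ts hts md r res := by
            have := pvJump_shift s ts hts md (r - (b + ts - 1)) (b + ts - 1) res
              (by omega) (fun r' h1 h2 => hbad r' h1 (by omega))
            rwa [show b + ts - 1 + (r - (b + ts - 1)) = r by omega] at this
          rw [hR]
          conv_rhs => rw [pvJump]
          rw [dif_pos hr, if_pos hgap]
        · -- quiet step: left and res unchanged
          have hgapr : b + ts - 1 ≤ r → ¬(s.getD (r + 1 - ts) 0 - s.getD r 0 ≤ md) := by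
            intro hle hgap
            -- window smaller than ts and no violation forces left > r+1-ts, hence left > b
            have hlgt : r + 1 - ts < left := by omega
            have hblt : b < left := by omega
            have hj := hjust hblt
            have h1 : s.getD (left - 1) 0 ≤ s.getD (r + 1 - ts) 0 :=
              hdesc (r + 1 - ts) (left - 1) (by omega) (by omega)
            have h2 : s.getD r 0 ≤ s.getD (r - 1) 0 :=
              hdesc (r - 1) r (by omega) hr
            omega
          simp only [pvStepM]
          rw [if_neg hviol, if_neg hcomp]
          refine ih b (r + 1) left res (by omega) hbl (by omega) (by omega) ?_ ?_
          · intro hblt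
            have hj := hjust hblt
            have h2 : s.getD r 0 ≤ s.getD (r - 1) 0 :=
              hdesc (r - 1) r (by omega) hr
            simp only [Nat.add_sub_cancel]
            omega
          · intro r' h1 h2
            rcases Nat.lt_or_ge r' r with h3 | h3
            · exact hbad r' h1 h3
            · have : r' = r := by omega
              subst this
              exact hgapr h1
    · rw [show s.length - r = 0 by omega]
      exact (pvJump_bad_ext s ts hts md s.length (b + ts - 1) res (by omega)
        (fun r' h1 h2 => hbad r' h1 (by omega))).symm

-- with teamSize ≤ 0 (and maxDiff ≥ 0 when teamSize = 0) the pointer loop never counts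
theorem pvMidZero (s : List Int) (ts md : Int) (hts : ts ≤ 0) (hmd : ts = 0 → 0 ≤ md) :
    ∀ (k r left : Nat) (res : Int), s.length - r ≤ k → left ≤ r →
      ((List.range' r (s.length - r)).foldl (pvStepM s ts md) (left, res)).2 = res := by
  intro k
  induction k with
  | zero =>
    intro r left res hk _
    rw [show s.length - r = 0 by omega]
    rfl
  | succ k ih =>
    intro r left res hk hlr
    by_cases hr : r < s.length
    · rw [show s.length - r = (s.length - (r + 1)) + 1 by omega, List.range'_succ,
        List.foldl_cons]
      by_cases hviol : s.getD left 0 - s.getD r 0 > md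
      · have hnc : ¬((r : Int) + 1 - (left + 1 : Nat) = ts) := by
          intro h
          have hts0 : ts = 0 := by push_cast at h; omega
          have : left = r := by push_cast at h; omega
          subst this
          have := hmd hts0
          omega
        simp only [pvStepM]
        rw [if_pos hviol, if_neg hnc]
        exact ih (r + 1) (left + 1) res (by omega) (by omega)
      · have hnc : ¬((r : Int) + 1 - (left : Nat) = ts) := by omega
        simp only [pvStepM]
        rw [if_neg hviol, if_neg hnc]
        exact ih (r + 1) left res (by omega) (by omega)
    · rw [show s.length - r = 0 by omega]
      rfl

-- with teamSize = 0 and maxDiff < 0, A counts one 'team' at every index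
theorem pvAZero (s : List Int) (md : Int) (hmd : md < 0) :
    ∀ (m r : Nat) (c : Int),
      ((List.range' r m).foldl (pvStepA s 0 md) (r, [], [], c)).2.2.2 = c + m := by
  intro m
  induction m with
  | zero => intro r c; simp
  | succ m ih =>
    intro r c
    rw [List.range'_succ, List.foldl_cons]
    have hstep : pvStepA s 0 md (r, [], [], c) r = (r + 1, [], [], c + 1) := by
      simp [pvStepA, pvPopMax, pvPopMin, hmd]
    rw [hstep, ih (r + 1) (c + 1)]
    push_cast
    ring

-- ===== VERDICT (by name: the statement is the Claim_ definition above) =====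
theorem teamCount_spec : Claim_unchanged_teamCount := by
  intro skill ts md _ hnd
  unfold teamCount teamCount_alt
  by_cases hA : skill = [] ∨ (skill.length : Int) < ts
  · rw [if_pos hA, dif_pos ?_]
    rcases hA with h | h
    · subst h
      simp only [List.length_nil, Nat.cast_zero]
      omega
    · exact Or.inr h
  · rw [if_neg hA]
    push Not at hA
    obtain ⟨hne, hlen⟩ := hA
    have hdesc := pvDesc_sorted skill
    have hmid := pvFold_eq (PySem.List.sorted skill (fun x => x) true) ts md hdesc
      (PySem.List.sorted skill (fun x => x) true).length 0 0 [] [] 0 (by omega)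
      ⟨le_refl 0, (pvDl_self 0).symm, 0, le_refl 0, le_refl 0, (pvDl_self 0).symm,
        fun i h1 h2 => by omega⟩
    rw [List.range_eq_range', hmid]
    by_cases hts0 : ts ≤ 0
    · rw [dif_pos (Or.inl hts0)]
      have hmd0 : ts = 0 → 0 ≤ md := by
        intro h0
        by_contra hneg
        exact hnd ⟨h0, by omega, hne⟩
      have hz := pvMidZero (PySem.List.sorted skill (fun x => x) true) ts md hts0 hmd0
        (PySem.List.sorted skill (fun x => x) true).length 0 0 0 (by omega) (le_refl 0)
      simpa using hz
    · rw [dif_neg (by push Not; constructor <;> omega)]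
      have hts1 : (1 : Int) ≤ ts := by omega
      have hcast : ((ts.toNat : Nat) : Int) = ts := Int.toNat_of_nonneg (by omega)
      have hmain := pvMain (PySem.List.sorted skill (fun x => x) true) ts.toNat
        (by omega) md hdesc (PySem.List.sorted skill (fun x => x) true).length
        0 0 0 0 (by omega) (le_refl 0) (le_refl 0) (by omega)
        (by intro h; omega) (by intro r' h1 h2; omega)
      rw [hcast] at hmain
      simpa using hmain

theorem teamCount_changed : Claim_changed_teamCount := by
  unfold Claim_changed_teamCount; decide

theorem teamCount_tight : Claim_exact_teamCount := by
  intro skill ts md _ hD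
  obtain ⟨h0, hmd, hne⟩ := hD
  subst h0
  unfold teamCount teamCount_alt
  rw [if_neg (by
    push Not
    refine ⟨hne, by positivity⟩), dif_pos (Or.inl (le_refl 0))]
  rw [List.range_eq_range']
  have hA := pvAZero (PySem.List.sorted skill (fun x => x) true) md hmd
    (PySem.List.sorted skill (fun x => x) true).length 0 0
  rw [hA]
  have hlen : (PySem.List.sorted skill (fun x => x) true).length = skill.length :=
    PySem.List.length_sorted skill (fun x => x) true
  have hpos : 0 < skill.length := List.length_pos_iff.mpr hne
  rw [hlen]
  omega
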